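-- pv_equiv track=rewrite | github.com/gkmzinsou/python | Help!!.py | populatesCitedBy
-- ===== SOURCE A (Python) =====
-- def populatesCitedBy(dictArticleToCitationList):
--     new = {}       # empty dictionary that I want to populate with this function
--     res = []
--     for articleID in dictArticleToCitationList.keys():
--         for key, value in dictArticleToCitationList.items():
--             if articleID in value :
--                 res.append(key)
--     return res
-- ===== SOURCE B (Python) =====
-- def populatesCitedBy(dictArticleToCitationList):
--     # Build an inverted index article -> [keys whose citation list contains it] once,
--     # then concatenate the per-article lists in key order.
--     index = {}
--     for key, value in dictArticleToCitationList.items():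
--         for a in set(value):
--             index.setdefault(a, []).append(key)
--     return [k for a in dictArticleToCitationList for k in index.get(a, [])]
-- ===== Notes on version B (the rewrite author's own statement) =====
-- stated objective: faster
-- what changed: Replaces the nested scan of all items for every key by an inverted index (article id -> citing keys) built in one pass, then a lookup per key.
import Mathlib
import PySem

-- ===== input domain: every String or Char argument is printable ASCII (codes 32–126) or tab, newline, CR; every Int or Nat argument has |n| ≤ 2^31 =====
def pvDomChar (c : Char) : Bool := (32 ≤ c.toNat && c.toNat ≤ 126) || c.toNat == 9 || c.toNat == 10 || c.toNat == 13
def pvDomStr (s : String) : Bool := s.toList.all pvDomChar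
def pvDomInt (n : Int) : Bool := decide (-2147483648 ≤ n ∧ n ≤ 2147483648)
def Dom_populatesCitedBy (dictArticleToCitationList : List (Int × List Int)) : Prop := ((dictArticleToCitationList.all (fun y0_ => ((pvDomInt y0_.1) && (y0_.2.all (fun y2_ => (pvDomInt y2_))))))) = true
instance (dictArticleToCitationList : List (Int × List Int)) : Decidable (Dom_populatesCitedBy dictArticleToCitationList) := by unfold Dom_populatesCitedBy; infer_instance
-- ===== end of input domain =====

-- B replaces A's quadratic rescan of all items per key by an inverted index built once; faster (asymptotic).

-- ===== PORT A =====
-- for articleID in d.keys(): for key, value in d.items(): if articleID in value: res.append(key)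
def populatesCitedBy (dictArticleToCitationList : List (Int × List Int)) : List Int :=
  dictArticleToCitationList.foldl
    (fun res kv0 =>
      dictArticleToCitationList.foldl
        (fun res kv => if kv0.1 ∈ kv.2 then res ++ [kv.1] else res) res)
    []

-- ===== PORT B =====
-- index = {}; for key, value in d.items(): for a in set(value): index.setdefault(a, []).append(key)
-- return [k for a in d for k in index.get(a, [])]
def populatesCitedBy_alt (dictArticleToCitationList : List (Int × List Int)) : List Int :=
  let index : PySem.Dict Int (List Int) :=
    dictArticleToCitationList.foldl
      (fun idx kv =>
        (PySem.Set.ofList kv.2).foldl (fun idx a => idx.modify a [] (· ++ [kv.1])) idx)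
      PySem.Dict.empty
  dictArticleToCitationList.flatMap (fun kv => index.getD kv.1 [])

-- ===== PRECONDITION & SPEC =====
def Spec_populatesCitedBy (dictArticleToCitationList : List (Int × List Int)) (out : List Int) : Prop := out = populatesCitedBy_alt dictArticleToCitationList
instance (dictArticleToCitationList : List (Int × List Int)) (out : List Int) : Decidable (Spec_populatesCitedBy dictArticleToCitationList out) := by unfold Spec_populatesCitedBy; infer_instance

-- ===== CLAIM (what is proved, stated in full; the proofs are below) =====
def Claim_equal_populatesCitedBy : Prop := ∀ (dictArticleToCitationList : List (Int × List Int)), Dom_populatesCitedBy dictArticleToCitationList → Spec_populatesCitedBy dictArticleToCitationList (populatesCitedBy dictArticleToCitationList)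

-- ===== LEMMAS AND PROOFS =====

-- A's inner loop: append kv.1 whenever a ∈ kv.2.
theorem pvInnerA (a : Int) (l : List (Int × List Int)) (acc : List Int) :
    l.foldl (fun res kv => if a ∈ kv.2 then res ++ [kv.1] else res) acc
      = acc ++ (l.filter (fun kv => decide (a ∈ kv.2))).map (·.1) := by
  induction l generalizing acc with
  | nil => simp
  | cons kv t ih =>
      by_cases h : a ∈ kv.2 <;> simp [h, ih, List.append_assoc]

-- the setdefault/append loop over one citation list, via the list's count of a
theorem pvModFold (xs : List Int) (k a : Int) (acc : PySem.Dict Int (List Int)) :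
    (xs.foldl (fun idx x => idx.modify x [] (· ++ [k])) acc).getD a []
      = acc.getD a [] ++ List.replicate (xs.count a) k := by
  induction xs generalizing acc with
  | nil => simp
  | cons x t ih =>
      simp only [List.foldl_cons, ih]
      by_cases h : a = x
      · subst h
        simp [PySem.Dict.getD_modify_self, List.count_cons_self,
              List.replicate_succ, List.append_assoc]
      · rw [PySem.Dict.getD_modify_of_ne _ _ _ h]; simp [List.count_cons]; exact fun hx => h hx.symm

-- the whole index build: index.get(a, []) lists the keys whose value contains a, in key order
theorem pvIndexGetD (l : List (Int × List Int)) (acc : PySem.Dict Int (List Int)) (a : Int) :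
    (l.foldl
        (fun idx kv =>
          (PySem.Set.ofList kv.2).foldl (fun idx x => idx.modify x [] (· ++ [kv.1])) idx)
        acc).getD a []
      = acc.getD a [] ++ (l.filter (fun kv => decide (a ∈ kv.2))).map (·.1) := by
  induction l generalizing acc with
  | nil => simp
  | cons kv t ih =>
      simp only [List.foldl_cons, ih, pvModFold]
      have hn : (PySem.Set.ofList kv.2).Nodup := PySem.Set.nodup_ofList kv.2
      by_cases h : a ∈ kv.2
      · have hmem : a ∈ PySem.Set.ofList kv.2 := (PySem.Set.mem_ofList _ _).2 h
        rw [List.count_eq_one_of_mem hn hmem]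
        simp [h, List.append_assoc]
      · have hmem : a ∉ PySem.Set.ofList kv.2 := fun hc => h ((PySem.Set.mem_ofList _ _).1 hc)
        rw [List.count_eq_zero.2 hmem]
        simp [h]

-- ===== VERDICT (by name: the statement is the Claim_ definition above) =====
theorem populatesCitedBy_spec : Claim_equal_populatesCitedBy := by
  intro d _
  unfold Spec_populatesCitedBy populatesCitedBy populatesCitedBy_alt
  have hstep :
      (fun (res : List Int) (kv0 : Int × List Int) =>
          d.foldl (fun res kv => if kv0.1 ∈ kv.2 then res ++ [kv.1] else res) res)
        = fun res kv0 => res ++ (d.filter (fun kv => decide (kv0.1 ∈ kv.2))).map (·.1) := by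
    funext res kv0; exact pvInnerA kv0.1 d res
  rw [hstep, PySem.List.foldl_append_eq_flatMap]
  simp only [List.nil_append]
  refine List.flatMap_congr ?_ -- pointwise: each lookup equals A's inner pass result
  intro kv _
  rw [pvIndexGetD]
  simp
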